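-- pv_equiv track=rewrite | github.com/Wonyoungpark/TIL | Programmers/문자열압축.py | solution
-- ===== SOURCE A (Python) =====
-- def solution(s):
--     leng = len(s)
--     cnt = 1
--     answer = [leng]
--
--     for spl in range(1,leng):
--         result = ""
--         split_str = [ s[i:i+spl] for i in range(0,leng, spl)] # 문자열 갯수별로 쪼개기
--         stack = [[split_str[0],1]]
--
--         for unit in split_str[1:]:
--             if stack[-1][0] != unit: # 이전값과 다른 경우
--                 stack.append([unit,1])
--             else: # 이전값과 같은 경우
--                 stack[-1][cnt] += 1
--
--         result += ('').join([str(cnt) + w if cnt > 1 else w for w, cnt in stack])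
--         answer.append(len(result))
--     return min(answer)
-- ===== SOURCE B (Python) =====
-- def solution(s):
--     n = len(s)
--     best = n  # no-split case
--     for spl in range(1, n):
--         full = n // spl
--         rem = n % spl
--         # run lengths among the full chunks, found by direct character comparison
--         runs = []
--         run = 1
--         for j in range(full - 1):
--             if all(s[j*spl + t] == s[j*spl + spl + t] for t in range(spl)):
--                 run += 1
--             else:
--                 runs.append(run)
--                 run = 1
--         runs.append(run)
--         total = sum(spl + (len(str(c)) if c > 1 else 0) for c in runs)
--         if rem:
--             total += rem  # short tail chunk is always its own run of count 1
--         if total < best: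
--             best = total
--     return best
-- ===== Notes on version B (the rewrite author's own statement) =====
-- stated objective: alternative
-- what changed: B never materializes chunk substrings, a stack of [chunk,count] pairs or a joined compressed string: it compares chunks character-by-character at computed indices, collects the list of run lengths over the full chunks, computes the compressed length arithmetically as sum(spl + digit cost) plus the remainder tail, and keeps a running minimum.
import Mathlib
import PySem

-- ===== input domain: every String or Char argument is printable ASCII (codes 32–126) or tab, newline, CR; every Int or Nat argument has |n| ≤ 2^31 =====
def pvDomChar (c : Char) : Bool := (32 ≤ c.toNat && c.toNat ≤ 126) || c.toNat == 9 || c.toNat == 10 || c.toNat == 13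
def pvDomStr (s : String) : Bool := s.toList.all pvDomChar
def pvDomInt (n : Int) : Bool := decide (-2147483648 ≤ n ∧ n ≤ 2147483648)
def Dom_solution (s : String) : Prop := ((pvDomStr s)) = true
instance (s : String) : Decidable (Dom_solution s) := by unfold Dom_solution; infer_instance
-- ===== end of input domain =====

-- B avoids chunk substrings, the stack of [chunk,count] pairs and the joined string:
-- it compares chunks character-by-character, collects run lengths, and sums arithmetically.

-- ===== PORT A =====
-- one step of A's inner loop: compare unit with stack[-1][0], push or bump the count
-- (stack[-1] is always defined in A since the stack starts nonempty; the 'none' arm is unreachable)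
def solStepA (st : List (String × Int)) (unit : String) : List (String × Int) :=
  match PySem.List.pyGet? st (-1) with
  | none => st
  | some top => if top.1 ≠ unit then st ++ [(unit, 1)] else st.dropLast ++ [(top.1, top.2 + 1)]

def solution (s : String) : Int :=
  let leng := PySem.Str.len s
  let answer : List Int := [leng]
  let answer := (PySem.List.pyRange 1 leng 1).foldl (fun answer spl =>
    let result : String := ""
    let split_str := (PySem.List.pyRange 0 leng spl).map
      (fun i => PySem.Str.slice s (some i) (some (i + spl)))
    -- split_str[0]: the list is nonempty for every spl the loop reaches (1 ≤ spl < leng)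
    let stack := (PySem.List.slice split_str (some 1) none).foldl solStepA
      [(PySem.List.pyGetD split_str 0 "", (1 : Int))]
    let result := result ++ PySem.Str.join ""
      (stack.map (fun wc => if wc.2 > 1 then PySem.Int.toStr wc.2 ++ wc.1 else wc.1))
    answer ++ [PySem.Str.len result]) answer
  (PySem.List.min? answer (fun x => x)).getD 0  -- min(answer); answer is nonempty, getD unreachable

-- ===== PORT B =====
-- Source B's 'all(s[j*spl+t] == s[j*spl+spl+t] for t in range(spl))'
def chunkEqB (s : String) (spl j : Int) : Bool :=
  (PySem.List.pyRange 0 spl 1).all (fun t =>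
    PySem.Str.pyGet? s (j * spl + t) == PySem.Str.pyGet? s (j * spl + spl + t))

def solution_alt (s : String) : Int :=
  let n := PySem.Str.len s
  (PySem.List.pyRange 1 n 1).foldl (fun best spl =>
    let full := PySem.Int.floordiv n spl
    let rem := PySem.Int.mod n spl
    -- inner loop over j in range(full-1) with state (runs, run)
    let rr := (PySem.List.pyRange 0 (full - 1) 1).foldl
      (fun (st : List Int × Int) j =>
        if chunkEqB s spl j then (st.1, st.2 + 1) else (st.1 ++ [st.2], 1)) ([], 1)
    let runs := rr.1 ++ [rr.2]
    let total := (runs.map (fun c =>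
      spl + (if c > 1 then PySem.Str.len (PySem.Int.toStr c) else 0))).sum
    let total := if rem ≠ 0 then total + rem else total
    if total < best then total else best) n

-- ===== PRECONDITION & SPEC =====
def Spec_solution (s : String) (out : Int) : Prop := out = solution_alt s
instance (s : String) (out : Int) : Decidable (Spec_solution s out) := by unfold Spec_solution; infer_instance

-- ===== CLAIM (what is proved, stated in full; the proofs are below) =====
def Claim_equal_solution : Prop := ∀ (s : String), Dom_solution s → Spec_solution s (solution s)

-- ===== LEMMAS AND PROOFS =====

-- the k-th chunk string, exactly as A's comprehension produces it (i = 0 + spl*k)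
def solChunk (s : String) (spl : Int) (k : Nat) : String :=
  PySem.Str.slice s (some (0 + spl * (k : Int))) (some (0 + spl * (k : Int) + spl))

-- one step of B's inner loop with the character test replaced by chunk-string equality
def solRunStep (s : String) (spl : Int) (st : List Int × Int) (j : Nat) : List Int × Int :=
  if solChunk s spl j = solChunk s spl (j + 1) then (st.1, st.2 + 1) else (st.1 ++ [st.2], 1)

-- length contribution of one stack entry in A's joined result
def solEnt (wc : String × Int) : Int :=
  PySem.Str.len wc.1 + (if wc.2 > 1 then PySem.Str.len (PySem.Int.toStr wc.2) else 0)

def solEntSum (l : List (String × Int)) : Int := (l.map solEnt).sum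

theorem solChunk_toList (s : String) (p k : Nat) :
    (solChunk s (p : Int) k).toList = (s.toList.drop (k * p)).take p := by
  have h1 : (0 + (p : Int) * (k : Int)) = ((k * p : Nat) : Int) := by push_cast; ring
  have h2 : (0 + (p : Int) * (k : Int) + (p : Int)) = (((k * p : Nat) : Int) + ((p : Nat) : Int)) := by
    push_cast; ring
  simp only [solChunk, PySem.Str.toList_slice, PySem.Chars.slice_eq_listSlice, h1,
    PySem.List.slice_natCast_add]

theorem solChunk_len (s : String) (p k : Nat) (h : k * p + p ≤ s.toList.length) :
    (solChunk s (p : Int) k).toList.length = p := by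
  rw [solChunk_toList]
  simp only [List.length_take, List.length_drop]
  omega

-- B's character-by-character test decides chunk-string equality (full chunks)
theorem sol_ceil (a b : Nat) (h : 0 < b) :
    (a + b - 1) / b = a / b + (if a % b = 0 then 0 else 1) := by
  have hdm := Nat.div_add_mod a b
  have e : a + b - 1 = b * (a / b) + (a % b + b - 1) := by omega
  rw [e, Nat.mul_add_div h]
  by_cases h0 : a % b = 0
  · simp [h0, Nat.div_eq_of_lt (by omega : b - 1 < b)]
  · have hrb : a % b < b := Nat.mod_lt _ h
    rw [Nat.div_eq_of_lt_le (by omega : 1 * b ≤ a % b + b - 1)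
      (by omega : a % b + b - 1 < (1 + 1) * b)]
    simp [h0]

theorem solChunkEq_iff (s : String) (p j : Nat) (_hp : 0 < p)
    (h : (j + 1) * p + p ≤ s.toList.length) :
    (chunkEqB s (p : Int) (j : Int) = true) ↔ solChunk s (p : Int) j = solChunk s (p : Int) (j + 1) := by
  have e1 : (j + 1) * p = j * p + p := by ring
  have hlen1 : (solChunk s (p : Int) j).toList.length = p :=
    solChunk_len s p j (by omega)
  have hlen2 : (solChunk s (p : Int) (j + 1)).toList.length = p :=
    solChunk_len s p (j + 1) h
  constructor
  · intro hall
    rw [chunkEqB, PySem.List.pyRange_zero_natCast, List.all_map, List.all_eq_true] at hall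
    rw [← String.toList_inj]
    apply List.ext_getElem (by rw [hlen1, hlen2])
    intro t ht1 ht2
    have ht : t < p := by rw [hlen1] at ht1; exact ht1
    have hone := hall t (List.mem_range.mpr ht)
    simp only [Function.comp] at hone
    rw [show ((j : Int) * (p : Int) + (t : Int)) = ((j * p + t : Nat) : Int) by push_cast; ring,
        show ((j : Int) * (p : Int) + (p : Int) + (t : Int)) = (((j + 1) * p + t : Nat) : Int) by
          push_cast; ring,
        PySem.Str.pyGet?_natCast, PySem.Str.pyGet?_natCast] at hone
    have hi1 : j * p + t < s.toList.length := by omega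
    have hi2 : (j + 1) * p + t < s.toList.length := by omega
    rw [List.getElem?_eq_getElem hi1, List.getElem?_eq_getElem hi2] at hone
    have heq : s.toList[j * p + t] = s.toList[(j + 1) * p + t] := by simpa using hone
    simp only [solChunk_toList, List.getElem_take, List.getElem_drop]
    exact heq
  · intro hEq
    rw [chunkEqB, PySem.List.pyRange_zero_natCast, List.all_map, List.all_eq_true]
    intro t htm
    rw [List.mem_range] at htm
    simp only [Function.comp]
    rw [show ((j : Int) * (p : Int) + (t : Int)) = ((j * p + t : Nat) : Int) by push_cast; ring,
        show ((j : Int) * (p : Int) + (p : Int) + (t : Int)) = (((j + 1) * p + t : Nat) : Int) by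
          push_cast; ring,
        PySem.Str.pyGet?_natCast, PySem.Str.pyGet?_natCast]
    have hi1 : j * p + t < s.toList.length := by omega
    have hi2 : (j + 1) * p + t < s.toList.length := by omega
    rw [List.getElem?_eq_getElem hi1, List.getElem?_eq_getElem hi2]
    have hL := congrArg String.toList hEq
    have h3 : (solChunk s (p : Int) j).toList[t]'(by omega) =
        (solChunk s (p : Int) (j + 1)).toList[t]'(by omega) := by simp only [hL]
    simp only [solChunk_toList, List.getElem_take, List.getElem_drop] at h3
    simpa using h3

-- invariant of the two inner loops: A's stack is B's runs, a full chunk at the top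
theorem sol_runs (s : String) (p : Nat) (_hp : 0 < p) (f : Nat) (hfN : f * p ≤ s.toList.length)
    (K : Nat) (hK : K < f) :
    ∃ pre c,
      (List.range K).foldl (fun st k => solStepA st (solChunk s (p : Int) (k + 1)))
          [(solChunk s (p : Int) 0, (1 : Int))] = pre ++ [(solChunk s (p : Int) K, c)]
      ∧ pre.map Prod.snd = ((List.range K).foldl (solRunStep s (p : Int)) ([], 1)).1
      ∧ c = ((List.range K).foldl (solRunStep s (p : Int)) ([], 1)).2
      ∧ ∀ e ∈ pre ++ [(solChunk s (p : Int) K, c)], e.1.toList.length = p := by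
  induction K with
  | zero =>
    refine ⟨[], 1, by simp, rfl, rfl, ?_⟩
    intro e he
    simp only [List.nil_append, List.mem_singleton] at he
    subst he
    exact solChunk_len s p 0 (by have := Nat.mul_le_mul_right p (show 1 ≤ f by omega); omega)
  | succ K ih =>
    obtain ⟨pre, c, hA, hB1, hB2, hlen⟩ := ih (by omega)
    have hKp : (K + 1) * p + p ≤ s.toList.length := by
      have : (K + 2) * p ≤ f * p := Nat.mul_le_mul_right p (by omega)
      have e2 : (K + 2) * p = (K + 1) * p + p := by ring
      omega
    rw [List.range_succ, List.foldl_append, List.foldl_append, List.foldl_cons, List.foldl_nil,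
      List.foldl_cons, List.foldl_nil, hA]
    rw [show solStepA (pre ++ [(solChunk s (p : Int) K, c)]) (solChunk s (p : Int) (K + 1))
        = (if solChunk s (p : Int) K ≠ solChunk s (p : Int) (K + 1) then
            (pre ++ [(solChunk s (p : Int) K, c)]) ++ [(solChunk s (p : Int) (K + 1), 1)]
          else pre ++ [(solChunk s (p : Int) K, c + 1)]) from by
      simp [solStepA, PySem.List.pyGet?_neg_one_append_singleton]]
    by_cases hc : solChunk s (p : Int) K = solChunk s (p : Int) (K + 1)
    · refine ⟨pre, c + 1, ?_, ?_, ?_, ?_⟩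
      · rw [if_neg (by simp [hc]), hc]
      · rw [solRunStep, if_pos hc]; exact hB1
      · rw [solRunStep, if_pos hc]; simp [← hB2]
      · intro e he
        rcases List.mem_append.mp he with h' | h'
        · exact hlen e (List.mem_append.mpr (Or.inl h'))
        · simp only [List.mem_singleton] at h'
          subst h'
          exact solChunk_len s p (K + 1) hKp
    · refine ⟨pre ++ [(solChunk s (p : Int) K, c)], 1, ?_, ?_, ?_, ?_⟩
      · rw [if_pos hc]
      · rw [solRunStep, if_neg hc]
        simp [hB1, hB2]
      · rw [solRunStep, if_neg hc]
      · intro e he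
        rcases List.mem_append.mp he with h' | h'
        · exact hlen e h'
        · simp only [List.mem_singleton] at h'
          subst h'
          exact solChunk_len s p (K + 1) hKp

-- when every key has length p, the entry sum depends only on the counts
theorem sol_entSum_const (p : Nat) (st : List (String × Int)) (h : ∀ e ∈ st, e.1.toList.length = p) :
    solEntSum st = ((st.map Prod.snd).map (fun c =>
      ((p : Nat) : Int) + (if c > 1 then PySem.Str.len (PySem.Int.toStr c) else 0))).sum := by
  induction st with
  | nil => simp [solEntSum]
  | cons e t ih =>
    have he := h e (by simp)
    simp only [solEntSum, List.map_cons, List.sum_cons] at *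
    rw [ih (fun x hx => h x (by simp [hx]))]
    simp [solEnt, PySem.Str.len_eq, he]

theorem solEntSum_append_singleton (l : List (String × Int)) (x : String × Int) :
    solEntSum (l ++ [x]) = solEntSum l + solEnt x := by
  simp [solEntSum]

-- Chars.join with empty separator is concatenation, one step
theorem chars_join_nil_cons (a : List Char) (r : List (List Char)) :
    PySem.Chars.join [] (a :: r) = a ++ PySem.Chars.join [] r := by
  cases r with
  | nil => simp [PySem.Chars.join_singleton, PySem.Chars.join_nil]
  | cons b t => rw [PySem.Chars.join_cons_cons]; simp

theorem chars_join_nil_len (l : List (List Char)) :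
    (PySem.Chars.join [] l).length = (l.map List.length).sum := by
  induction l with
  | nil => simp [PySem.Chars.join_nil]
  | cons a r ih => rw [chars_join_nil_cons]; simp [ih]

-- summed code-point lengths of the rendered entries = entry-length sum
theorem sol_sum_part (stack : List (String × Int)) :
    ((List.map List.length (List.map String.toList
      (stack.map (fun wc => if wc.2 > 1 then PySem.Int.toStr wc.2 ++ wc.1 else wc.1)))).sum : Int)
      = solEntSum stack := by
  induction stack with
  | nil => simp [solEntSum]
  | cons wc r ih =>
    simp only [List.map_cons, List.sum_cons, solEntSum] at *
    rw [Nat.cast_add, ih]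
    by_cases h : wc.2 > 1
    · simp [h, solEnt]; ring
    · simp [h, solEnt]

-- length of A's joined result equals the entry-length sum
theorem sol_join_len (stack : List (String × Int)) :
    PySem.Str.len ("" ++ PySem.Str.join ""
      (stack.map (fun wc => if wc.2 > 1 then PySem.Int.toStr wc.2 ++ wc.1 else wc.1)))
      = solEntSum stack := by
  have h0 : PySem.Str.len ("" ++ PySem.Str.join ""
      (stack.map (fun wc => if wc.2 > 1 then PySem.Int.toStr wc.2 ++ wc.1 else wc.1)))
      = ((PySem.Str.join ""
      (stack.map (fun wc => if wc.2 > 1 then PySem.Int.toStr wc.2 ++ wc.1 else wc.1))).toList.length : Int) := by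
    simp
  rw [h0, PySem.Str.toList_join]
  simp only [String.toList_empty]
  rw [chars_join_nil_len]
  exact sol_sum_part stack

-- min(list) = running minimum with strict <
theorem sol_min_foldl (l : List Int) (a : Int) (g : Int → Int) :
    (PySem.List.min? (a :: l.map g) (fun x => x)).getD 0 =
      l.foldl (fun best x => if g x < best then g x else best) a := by
  rw [PySem.List.min?_id_cons]
  simp only [Option.getD_some]
  induction l generalizing a with
  | nil => simp
  | cons x t ih =>
    simp only [List.map_cons, List.foldl_cons, ← ih]
    congr 1
    simp only [min_def]
    split_ifs <;> omega

-- per split size: A's compressed length equals B's arithmetic total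
theorem sol_perspl (s : String) (spl : Int) (h1 : 1 ≤ spl) (h2 : spl < PySem.Str.len s) :
    PySem.Str.len ("" ++ PySem.Str.join ""
      (((PySem.List.slice ((PySem.List.pyRange 0 (PySem.Str.len s) spl).map
            (fun i => PySem.Str.slice s (some i) (some (i + spl)))) (some 1) none).foldl solStepA
          [(PySem.List.pyGetD ((PySem.List.pyRange 0 (PySem.Str.len s) spl).map
            (fun i => PySem.Str.slice s (some i) (some (i + spl)))) 0 "", (1 : Int))]).map
        (fun wc => if wc.2 > 1 then PySem.Int.toStr wc.2 ++ wc.1 else wc.1)))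
    = (let full := PySem.Int.floordiv (PySem.Str.len s) spl
       let rem := PySem.Int.mod (PySem.Str.len s) spl
       let rr := (PySem.List.pyRange 0 (full - 1) 1).foldl
         (fun (st : List Int × Int) j =>
           if chunkEqB s spl j then (st.1, st.2 + 1) else (st.1 ++ [st.2], 1)) ([], 1)
       let runs := rr.1 ++ [rr.2]
       let total := (runs.map (fun c =>
         spl + (if c > 1 then PySem.Str.len (PySem.Int.toStr c) else 0))).sum
       if rem ≠ 0 then total + rem else total) := by
  have hn : PySem.Str.len s = ((s.toList.length : Nat) : Int) := PySem.Str.len_eq s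
  obtain ⟨p, rfl⟩ : ∃ p : Nat, spl = (p : Int) := ⟨spl.toNat, (Int.toNat_of_nonneg (by omega)).symm⟩
  have hp : 0 < p := by exact_mod_cast h1
  have hpN : p < s.toList.length := by rw [hn] at h2; exact_mod_cast h2
  set N := s.toList.length with hNdef
  set f := N / p with hfdef
  set r := N % p with hrdef
  have hdm : p * f + r = N := Nat.div_add_mod N p
  have hrp : r < p := Nat.mod_lt _ hp
  have hf1 : 1 ≤ f := (Nat.one_le_div_iff hp).mpr (le_of_lt hpN)
  have hfN : f * p ≤ N := Nat.div_mul_le_self N p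
  set M := if r = 0 then f else f + 1 with hMdef
  -- A's chunk list is the M chunk strings
  have hM : PySem.List.pyRange 0 (PySem.Str.len s) (p : Int)
      = (List.range M).map (fun k : Nat => 0 + (p : Int) * (k : Int)) := by
    rw [hn, PySem.List.pyRange_of_pos _ _ (show (0 : Int) < (p : Int) by exact_mod_cast hp)]
    have hlt : (0 : Int) < (N : Int) := by exact_mod_cast (show 0 < N by omega)
    rw [if_pos hlt]
    congr 2
    have e : ((N : Int) - 0 + (p : Int) - 1) = ((N + p - 1 : Nat) : Int) := by
      have h' : 1 ≤ N + p := by omega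
      rw [Nat.cast_sub h']; push_cast; ring
    rw [e, ← Int.natCast_div, Int.toNat_natCast, sol_ceil N p hp, hMdef]
    split_ifs with h0 <;> omega
  have hcomp : ((fun i => PySem.Str.slice s (some i) (some (i + (p : Int)))) ∘
      fun k : Nat => 0 + (p : Int) * (k : Int)) = solChunk s (p : Int) := rfl
  have hM1 : M = (M - 1) + 1 := by rw [hMdef]; split_ifs <;> omega
  rw [hM, List.map_map, hcomp, hM1, List.range_succ_eq_map, List.map_cons,
    PySem.List.pyGetD_zero_cons, PySem.List.slice_from_one, List.tail_cons, List.map_map]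
  simp only [List.foldl_map, Function.comp, Nat.succ_eq_add_one]
  -- B side: full = f, rem = r, and the index loop is the runStep loop
  have hfull : PySem.Int.floordiv (PySem.Str.len s) (p : Int) = ((f : Nat) : Int) := by
    rw [hn]; exact PySem.Int.floordiv_natCast N p
  have hrem : PySem.Int.mod (PySem.Str.len s) (p : Int) = ((r : Nat) : Int) := by
    rw [hn]; exact PySem.Int.mod_natCast N p
  have hf1' : ((f : Nat) : Int) - 1 = ((f - 1 : Nat) : Int) := by omega
  simp only [hfull, hrem, hf1', PySem.List.pyRange_zero_natCast, List.foldl_map]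
  have hcong : ∀ (acc : List Int × Int) (j : Nat), j ∈ List.range (f - 1) →
      (if chunkEqB s (p : Int) ((j : Nat) : Int) then (acc.1, acc.2 + 1) else (acc.1 ++ [acc.2], 1))
        = solRunStep s (p : Int) acc j := by
    intro acc j hj
    rw [List.mem_range] at hj
    have hb : (j + 1) * p + p ≤ N := by
      have h2' : (j + 2) * p ≤ f * p := Nat.mul_le_mul_right p (by omega)
      have e2 : (j + 2) * p = (j + 1) * p + p := by ring
      omega
    by_cases hc : solChunk s (p : Int) j = solChunk s (p : Int) (j + 1)
    · rw [if_pos ((solChunkEq_iff s p j hp hb).mpr hc), solRunStep, if_pos hc]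
    · rw [if_neg (fun hx => hc ((solChunkEq_iff s p j hp hb).mp hx)), solRunStep, if_neg hc]
  rw [PySem.List.foldl_congr_mem _ _ _ _ hcong]
  by_cases hr0 : r = 0
  · -- no remainder: the last chunk is full
    obtain ⟨pre, c, hA, hB1, hB2, hlen⟩ := sol_runs s p hp f hfN (f - 1) (by omega)
    have hMf : M - 1 = f - 1 := by rw [hMdef, if_pos hr0]
    rw [hMf, hA, sol_join_len, sol_entSum_const p _ hlen]
    rw [if_neg (by simp [hr0])]
    simp [hB1, hB2]
  · -- remainder: one extra, shorter chunk, always its own run of count 1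
    have hMf : M - 1 = f := by rw [hMdef, if_neg hr0]; omega
    obtain ⟨pre, c, hA, hB1, hB2, hlen⟩ := sol_runs s p hp f hfN (f - 1) (by omega)
    have hff : f = (f - 1) + 1 := by omega
    have hrange : List.range f = List.range (f - 1) ++ [f - 1] := by
      conv_lhs => rw [hff]
      exact List.range_succ
    rw [hMf, hrange, List.foldl_append, List.foldl_cons, List.foldl_nil, hA]
    have hfe : (f - 1) + 1 = f := by omega
    rw [hfe]
    have hl2 : (solChunk s (p : Int) f).toList.length = r := by
      rw [solChunk_toList]
      simp only [List.length_take, List.length_drop]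
      have e3 : f * p = p * f := Nat.mul_comm f p
      omega
    have hne : solChunk s (p : Int) (f - 1) ≠ solChunk s (p : Int) f := by
      intro hEq
      have e2 : (f - 1) * p + p = f * p := by
        have e4 := Nat.sub_mul f 1 p
        have e6 : 1 * p ≤ f * p := Nat.mul_le_mul_right p hf1
        omega
      have hl1 : (solChunk s (p : Int) (f - 1)).toList.length = p :=
        solChunk_len s p (f - 1) (by omega)
      rw [hEq, hl2] at hl1
      omega
    rw [show solStepA (pre ++ [(solChunk s (p : Int) (f - 1), c)]) (solChunk s (p : Int) f)
        = (pre ++ [(solChunk s (p : Int) (f - 1), c)]) ++ [(solChunk s (p : Int) f, 1)] from by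
      simp [solStepA, PySem.List.pyGet?_neg_one_append_singleton, hne]]
    rw [sol_join_len, solEntSum_append_singleton, sol_entSum_const p _ hlen]
    have hEnt : solEnt (solChunk s (p : Int) f, 1) = ((r : Nat) : Int) := by
      simp [solEnt, PySem.Str.len_eq, hl2]
    rw [hEnt, if_pos (by simpa using hr0)]
    simp [hB1, hB2]

-- ===== VERDICT (by name: the statement is the Claim_ definition above) =====
theorem solution_spec : Claim_equal_solution := by
  intro s _
  unfold Spec_solution solution solution_alt
  simp only
  rw [PySem.List.foldl_append_singleton_eq_map, List.singleton_append, sol_min_foldl]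
  apply PySem.List.foldl_congr_mem
  intro best spl hmem
  rw [PySem.List.mem_pyRange_one] at hmem
  rw [sol_perspl s spl hmem.1 hmem.2]
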